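-- pv_equiv track=rewrite | github.com/joshanashakya/dissertation | workspace/dataset/java-python/GeeksForGeeks/554/A/2.py | maxPrimefactorNum
-- ===== SOURCE A (Python) =====
-- def maxPrimefactorNum(N):
--
--     if (N < 2):
--         return 0;
--
--     arr = [True] * (N + 1);
--     prod = 1;
--     res = 0;
--     p = 2;
--     while (p * p <= N):
--
--         # If p is prime
--         if (arr[p] == True):
--             for i in range(p * 2, N + 1, p):
--                 arr[i] = False;
--
--             # We simply multiply first set
--             # of prime numbers while the
--             # product is smaller than N.
--             prod *= p;
--             if (prod > N):
--                 return res;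
--             res += 1;
--         p += 1;
--
--     return res;
-- ===== SOURCE B (Python) =====
-- # Trial-division over prime candidates: multiply consecutive primes while the
-- # product stays <= N.  No sieve array, O(1)-ish work for any N (the product
-- # exceeds N after at most ~10 primes for any 32-bit N), versus A's O(N) sieve.
-- # Unlike A, the loop condition is prod * p <= N (not p*p <= N), so the last
-- # primorial prime is counted even when it exceeds sqrt(N) (N in {2,3,6,7,8}).
--
-- def is_prime(n):
--     if n < 2:
--         return False
--     d = 2
--     while d * d <= n:
--         if n % d == 0:
--             return False
--         d += 1
--     return True
--
--
-- def maxPrimefactorNum(N):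
--     count = 0
--     prod = 1
--     p = 2
--     while prod * p <= N:
--         if is_prime(p):
--             prod *= p
--             count += 1
--         p += 1
--     return count
-- ===== Notes on version B (the rewrite author's own statement) =====
-- stated objective: faster
-- what changed: Replaces the size-N Sieve-of-Eratosthenes array (sieving all of [2..N] while multiplying primes up to sqrt(N)) with direct trial-division primality tests on the few consecutive primes whose running product can stay <= N, looping while prod*p <= N.
-- intended difference: For N in {2,3,6,7,8} A stops at primes <= sqrt(N) and returns one less (0,0,1,1,1) than the true count of leading primes whose product is <= N; B returns the intended 1,1,2,2,2 (e.g. 2*3=6<=6 but A never considers 3 since 3*3>6). — e.g. on maxPrimefactorNum(6): A returns 1, B returns 2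
import Mathlib
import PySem

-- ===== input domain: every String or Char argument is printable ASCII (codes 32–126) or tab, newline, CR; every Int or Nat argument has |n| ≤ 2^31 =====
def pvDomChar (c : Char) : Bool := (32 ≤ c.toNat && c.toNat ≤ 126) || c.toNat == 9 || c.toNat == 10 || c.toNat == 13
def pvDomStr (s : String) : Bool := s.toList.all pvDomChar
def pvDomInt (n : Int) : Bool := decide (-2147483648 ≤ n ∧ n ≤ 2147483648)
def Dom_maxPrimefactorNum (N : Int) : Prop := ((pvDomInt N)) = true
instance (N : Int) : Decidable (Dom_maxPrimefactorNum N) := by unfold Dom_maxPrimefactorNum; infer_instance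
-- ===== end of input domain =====

-- B replaces A's size-N sieve by trial-division over the few consecutive primes whose
-- running product fits in N (loop condition prod*p ≤ N instead of p*p ≤ N).

-- ===== PORT A =====
-- 'for i in range(p*2, N+1, p): arr[i] = False' — every i satisfies 2 ≤ i ≤ N < len(arr),
-- so i.toNat is exact here (no negative index ever occurs).
def pvMark (arr : List Bool) (idxs : List Int) : List Bool :=
  idxs.foldl (fun a i => a.set i.toNat false) arr

-- 'while (p*p <= N)': p increases by 1 each iteration starting at 2, so (N+1).toNat
-- fuel strictly bounds the number of iterations; fuel exhaustion is unreachable.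
def pvLoopA (N : Int) : Nat → List Bool → Int → Int → Int → Int
  | 0, _, _, res, _ => res
  | fuel+1, arr, prod, res, p =>
    if p * p ≤ N then
      if PySem.List.pyGet? arr p == some true then
        let arr' := pvMark arr (PySem.List.pyRange (p * 2) (N + 1) p)
        let prod' := prod * p
        if prod' > N then res
        else pvLoopA N fuel arr' prod' (res + 1) (p + 1)
      else pvLoopA N fuel arr prod res (p + 1)
    else res

def maxPrimefactorNum (N : Int) : Int :=
  if N < 2 then 0
  else pvLoopA N (N + 1).toNat (List.replicate (N + 1).toNat true) 1 0 2

-- ===== PORT B =====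
-- 'while d*d <= n' with d starting at 2: n.toNat fuel strictly bounds the iterations.
def pvIsPrimeAux (n : Int) : Nat → Int → Bool
  | 0, _ => true
  | fuel+1, d =>
    if d * d ≤ n then
      if PySem.Int.mod n d == 0 then false else pvIsPrimeAux n fuel (d + 1)
    else true

def pvIsPrime (n : Int) : Bool :=
  if n < 2 then false else pvIsPrimeAux n n.toNat 2

-- 'while prod*p <= N' with prod ≥ 1 and p increasing from 2: (N+1).toNat fuel suffices.
def pvLoopB (N : Int) : Nat → Int → Int → Int → Int
  | 0, _, count, _ => count
  | fuel+1, prod, count, p =>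
    if prod * p ≤ N then
      if pvIsPrime p then pvLoopB N fuel (prod * p) (count + 1) (p + 1)
      else pvLoopB N fuel prod count (p + 1)
    else count

def maxPrimefactorNum_alt (N : Int) : Int :=
  pvLoopB N (N + 1).toNat 1 0 2

-- ===== PRECONDITION & SPEC =====
-- For N in {2,3,6,7,8} A only looks at primes p with p*p ≤ N and so misses the last
-- prime of the primorial, returning one less than the intended count; B counts it.
def D_maxPrimefactorNum (N : Int) : Prop := N = 2 ∨ N = 3 ∨ (6 ≤ N ∧ N ≤ 8)
instance (N : Int) : Decidable (D_maxPrimefactorNum N) := by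
  unfold D_maxPrimefactorNum; infer_instance

def Spec_maxPrimefactorNum (N : Int) (out : Int) : Prop :=
  ¬ D_maxPrimefactorNum N → out = maxPrimefactorNum_alt N
instance (N : Int) (out : Int) : Decidable (Spec_maxPrimefactorNum N out) := by
  unfold Spec_maxPrimefactorNum; infer_instance

def pvDiffWitness_maxPrimefactorNum : Int := 6
def pvDiffWitnessOut_maxPrimefactorNum : Int × Int := (1, 2)

-- ===== CLAIM (what is proved, stated in full; the proofs are below) =====
def Claim_unchanged_maxPrimefactorNum : Prop :=
  ∀ (N : Int), Dom_maxPrimefactorNum N → Spec_maxPrimefactorNum N (maxPrimefactorNum N)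
def Claim_changed_maxPrimefactorNum : Prop :=
  Dom_maxPrimefactorNum (pvDiffWitness_maxPrimefactorNum) ∧
  D_maxPrimefactorNum (pvDiffWitness_maxPrimefactorNum) ∧
  maxPrimefactorNum (pvDiffWitness_maxPrimefactorNum) = pvDiffWitnessOut_maxPrimefactorNum.1 ∧
  maxPrimefactorNum_alt (pvDiffWitness_maxPrimefactorNum) = pvDiffWitnessOut_maxPrimefactorNum.2 ∧
  pvDiffWitnessOut_maxPrimefactorNum.1 ≠ pvDiffWitnessOut_maxPrimefactorNum.2
def Claim_exact_maxPrimefactorNum : Prop :=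
  ∀ (N : Int), Dom_maxPrimefactorNum N → D_maxPrimefactorNum N →
    maxPrimefactorNum N ≠ maxPrimefactorNum_alt N

-- ===== LEMMAS AND PROOFS =====

-- Boolean primality by full scan of divisors < n (proof vocabulary only).
def primeB (n : Nat) : Bool :=
  decide (2 ≤ n) && (List.range n).all (fun d => decide (d < 2) || decide (n % d ≠ 0))

theorem primeB_iff (n : Nat) : primeB n = true ↔ Nat.Prime n := by
  rw [Nat.prime_def_lt]
  simp only [primeB, Bool.and_eq_true, List.all_eq_true, List.mem_range,
    Bool.or_eq_true, decide_eq_true_eq]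
  constructor
  · rintro ⟨h2, hall⟩
    refine ⟨h2, fun m hm hdvd => ?_⟩
    rcases hall m hm with h | h
    · interval_cases m
      · exact absurd (zero_dvd_iff.mp hdvd) (by omega)
      · rfl
    · exfalso
      rcases Nat.eq_zero_or_pos m with rfl | hm0
      · exact absurd (zero_dvd_iff.mp hdvd) (by omega)
      · exact h (Nat.dvd_iff_mod_eq_zero.mp hdvd)
  · rintro ⟨h2, hmin⟩
    refine ⟨h2, fun d hd => ?_⟩
    by_cases hd2 : d < 2
    · exact Or.inl hd2
    · right
      intro hmod
      have : d ∣ n := Nat.dvd_of_mod_eq_zero hmod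
      have := hmin d hd this
      omega


-- Primorial: product of all primes < n.
def P : Nat → Nat
  | 0 => 1
  | n+1 => (if primeB n then n else 1) * P n

theorem P_pos (n : Nat) : 0 < P n := by
  induction n with
  | zero => simp [P]
  | succ n ih =>
    simp only [P]
    have : 0 < (if primeB n then n else 1) := by
      split
      · rename_i h
        have := (primeB_iff n).mp h
        have := this.two_le
        omega
      · omega
    positivity


theorem P_mono {m n : Nat} (h : m ≤ n) : P m ≤ P n := by
  induction n with
  | zero =>
    have : m = 0 := by omega
    simp [this]
  | succ n ih =>
    rcases Nat.lt_or_ge m (n+1) with h' | h'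
    · have := ih (by omega)
      calc P m ≤ P n := this
        _ ≤ (if primeB n then n else 1) * P n := by
            have : 1 ≤ (if primeB n then n else 1) := by
              split
              · rename_i hp; have := ((primeB_iff n).mp hp).two_le; omega
              · omega
            exact Nat.le_mul_of_pos_left _ (by omega)
    · have : m = n + 1 := by omega
      subst this; rfl


theorem P_ge_self : ∀ n < 33, 5 ≤ n → n ≤ P n := by decide

theorem P_33 : 2147483648 < P 33 := by decide

-- Trial division agrees with primeB.
theorem pvIsPrimeAux_iff (n : Int) :
    ∀ fuel (d : Int), 2 ≤ d → (n - d).toNat < fuel →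
      (pvIsPrimeAux n fuel d = true ↔ ∀ e : Int, d ≤ e → e * e ≤ n → ¬ (e ∣ n)) := by
  intro fuel
  induction fuel with
  | zero => intro d _ h; omega
  | succ fuel ih =>
    intro d hd hfuel
    simp only [pvIsPrimeAux]
    by_cases hdd : d * d ≤ n
    · rw [if_pos hdd]
      have hdn : d < n := by nlinarith
      by_cases hdvd : d ∣ n
      · have : PySem.Int.mod n d == 0 := by
          simp [PySem.Int.mod_eq_zero_iff_dvd n d, hdvd]
        rw [if_pos this]
        simp only [Bool.false_eq_true, false_iff, not_forall]
        push_neg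
        exact ⟨d, le_refl d, hdd, hdvd⟩
      · have : ¬ (PySem.Int.mod n d == 0) := by
          simp [PySem.Int.mod_eq_zero_iff_dvd n d, hdvd]
        rw [if_neg this]
        rw [ih (d+1) (by omega) (by omega)]
        constructor
        · intro h e he hee
          rcases eq_or_lt_of_le he with rfl | hlt
          · exact hdvd
          · exact h e (by omega) hee
        · intro h e he hee
          exact h e (by omega) hee
    · rw [if_neg hdd]
      simp only [true_iff]
      intro e he hee
      exfalso
      have : d * d ≤ e * e := by nlinarith
      omega


theorem pvIsPrime_eq (p : Int) (h0 : 0 ≤ p) : pvIsPrime p = primeB p.toNat := by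
  by_cases h2 : p < 2
  · have : primeB p.toNat = false := by
      have : p.toNat < 2 := by omega
      interval_cases h : p.toNat <;> decide
    simp [pvIsPrime, h2, this]
  · push_neg at h2
    have htn : 2 ≤ p.toNat := by omega
    have hiff := pvIsPrimeAux_iff p p.toNat 2 (by omega) (by omega)
    have hprime : (∀ e : Int, 2 ≤ e → e * e ≤ p → ¬ (e ∣ p)) ↔ Nat.Prime p.toNat := by
      constructor
      · intro h
        by_contra hnp
        set q := p.toNat.minFac with hq
        have hqp : Nat.Prime q := Nat.minFac_prime (by omega)
        have hqd : q ∣ p.toNat := Nat.minFac_dvd _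
        have hqs : q ^ 2 ≤ p.toNat := Nat.minFac_sq_le_self (by omega) hnp
        refine h (q : Int) (by exact_mod_cast hqp.two_le) ?_ ?_
        · have : ((q^2 : Nat) : Int) ≤ ((p.toNat : Nat) : Int) := by exact_mod_cast hqs
          push_cast at this
          rw [show ((p.toNat : Nat) : Int) = p from by omega] at *
          nlinarith [this]
        · have : (q : Int) ∣ (p.toNat : Int) := by exact_mod_cast hqd
          rwa [show ((p.toNat : Nat) : Int) = p from by omega] at this
      · intro hpr e he hee hdvd
        have he0 : 0 ≤ e := by omega
        have : e.toNat ∣ p.toNat := by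
          have : (e.toNat : Int) ∣ (p.toNat : Int) := by
            rw [show ((e.toNat : Nat) : Int) = e from by omega,
                show ((p.toNat : Nat) : Int) = p from by omega]
            exact hdvd
          exact_mod_cast this
        have hlt : e.toNat < p.toNat := by
          have : e < p := by nlinarith
          omega
        have := (Nat.prime_def_lt.mp hpr).2 e.toNat hlt this
        omega
    rw [Bool.eq_iff_iff, primeB_iff]
    simp only [pvIsPrime, if_neg (by omega : ¬ p < 2)]
    rw [hiff, hprime]


-- Sieve invariant: cell j of arr records "no prime q < p marked j".
def SInv (N p : Int) (arr : List Bool) : Prop :=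
  arr.length = (N + 1).toNat ∧
  ∀ j : Nat, j < arr.length →
    arr[j]? = some (! decide (∃ q, q < p.toNat ∧ primeB q = true ∧ q ∣ j ∧ 2 * q ≤ j))

theorem pvMark_length (idxs : List Int) (arr : List Bool) :
    (pvMark arr idxs).length = arr.length := by
  induction idxs generalizing arr with
  | nil => rfl
  | cons i is ih => simp only [pvMark, List.foldl_cons] at *; rw [ih, List.length_set]


theorem pvMark_getElem? (idxs : List Int) (arr : List Bool) (j : Nat)
    (h0 : ∀ i ∈ idxs, 0 ≤ i) :
    (pvMark arr idxs)[j]? =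
      if (j : Int) ∈ idxs ∧ j < arr.length then some false else arr[j]? := by
  induction idxs generalizing arr with
  | nil => simp [pvMark]
  | cons i is ih =>
    have hi : 0 ≤ i := h0 i (List.mem_cons_self ..)
    have hstep : pvMark arr (i :: is) = pvMark (arr.set i.toNat false) is := rfl
    rw [hstep, ih _ (fun x hx => h0 x (List.mem_cons_of_mem _ hx))]
    rw [List.length_set]
    by_cases hmem : (j : Int) ∈ is
    · by_cases hlen : j < arr.length
      · rw [if_pos ⟨hmem, hlen⟩, if_pos ⟨List.mem_cons_of_mem _ hmem, hlen⟩]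
      · rw [if_neg (by tauto), if_neg (by tauto), List.getElem?_set]
        split
        · split
          · omega
          · rw [List.getElem?_eq_none (by omega)]
        · rfl
    · simp only [if_neg (by tauto : ¬((j:Int) ∈ is ∧ j < arr.length))]
      rw [List.getElem?_set]
      by_cases hij : (j : Int) = i
      · have hji : i.toNat = j := by omega
        rw [if_pos hji, hji]
        by_cases hlen : j < arr.length
        · rw [if_pos hlen, if_pos ⟨by simp [hij], hlen⟩]
        · rw [if_neg hlen, if_neg (by tauto), List.getElem?_eq_none (by omega)]
      · have : ¬ (i.toNat = j) := by omega
        rw [if_neg this, if_neg ?_]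
        rintro ⟨hm, hlen⟩
        rcases List.mem_cons.mp hm with h | h
        · exact hij h
        · exact hmem h


theorem SInv_init (N : Int) (h : 2 ≤ N) :
    SInv N 2 (List.replicate (N + 1).toNat true) := by
  constructor
  · simp
  · intro j hj
    simp only [List.length_replicate] at hj
    rw [List.getElem?_replicate, if_pos hj]
    have hne : ¬ ∃ q, q < (2:Int).toNat ∧ primeB q = true ∧ q ∣ j ∧ 2 * q ≤ j := by
      rintro ⟨q, hq, hpr, _, _⟩
      have : q < 2 := by omega
      interval_cases q <;> simp_all [primeB]
    have hd : (! decide (∃ q, q < (2:Int).toNat ∧ primeB q = true ∧ q ∣ j ∧ 2 * q ≤ j)) = true := by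
      simp only [Bool.not_eq_true', decide_eq_false_iff_not]
      exact hne
    rw [hd]


theorem SInv_step_comp {N p : Int} {arr : List Bool} (h : SInv N p arr)
    (hp : 0 ≤ p) (hpr : primeB p.toNat = false) : SInv N (p + 1) arr := by
  obtain ⟨hlen, hget⟩ := h
  refine ⟨hlen, fun j hj => ?_⟩
  rw [hget j hj]
  have hcast : (p + 1).toNat = p.toNat + 1 := by omega
  have hiff : (∃ q, q < (p + 1).toNat ∧ primeB q = true ∧ q ∣ j ∧ 2 * q ≤ j) ↔
      (∃ q, q < p.toNat ∧ primeB q = true ∧ q ∣ j ∧ 2 * q ≤ j) := by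
    rw [hcast]
    constructor
    · rintro ⟨q, hq, hrest⟩
      refine ⟨q, ?_, hrest⟩
      rcases Nat.lt_or_ge q p.toNat with h' | h'
      · exact h'
      · exfalso
        have : q = p.toNat := by omega
        subst this
        rw [hpr] at hrest
        simp at hrest
    · rintro ⟨q, hq, hrest⟩
      exact ⟨q, by omega, hrest⟩
  rw [decide_eq_decide.mpr hiff]


theorem SInv_step_prime {N p : Int} {arr : List Bool} (h : SInv N p arr)
    (hp : 2 ≤ p) (hpN : p ≤ N) (hpr : primeB p.toNat = true) :
    SInv N (p + 1) (pvMark arr (PySem.List.pyRange (p * 2) (N + 1) p)) := by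
  obtain ⟨hlen, hget⟩ := h
  have hmem : ∀ x : Int, x ∈ PySem.List.pyRange (p * 2) (N + 1) p ↔
      p * 2 ≤ x ∧ x < N + 1 ∧ p ∣ x - p * 2 :=
    PySem.List.mem_pyRange_iff_of_pos (by omega)
  have h0 : ∀ i ∈ PySem.List.pyRange (p * 2) (N + 1) p, 0 ≤ i := by
    intro i hi
    have := (hmem i).mp hi
    omega
  refine ⟨by rw [pvMark_length, hlen], fun j hj => ?_⟩
  rw [pvMark_length] at hj
  rw [pvMark_getElem? _ _ _ h0]
  have hjN : (j : Int) ≤ N := by omega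
  have hdvd_iff : ((j:Int) ∈ PySem.List.pyRange (p * 2) (N + 1) p) ↔
      (p.toNat ∣ j ∧ 2 * p.toNat ≤ j) := by
    rw [hmem]
    constructor
    · rintro ⟨h1, h2, h3⟩
      have hd : p ∣ (j : Int) := by
        have : p ∣ (j - p * 2) + p * 2 := Dvd.dvd.add h3 ⟨2, rfl⟩
        simpa using this
      constructor
      · have : (p.toNat : Int) ∣ (j : Int) := by rwa [show ((p.toNat : Nat) : Int) = p from by omega]
        exact_mod_cast this
      · omega
    · rintro ⟨h1, h2⟩
      have hd : p ∣ (j : Int) := by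
        have : ((p.toNat : Nat) : Int) ∣ ((j : Nat) : Int) := by exact_mod_cast h1
        rwa [show ((p.toNat : Nat) : Int) = p from by omega] at this
      exact ⟨by omega, by omega, by exact (dvd_sub_right hd).mpr (⟨2, rfl⟩)⟩
  by_cases hm : (j:Int) ∈ PySem.List.pyRange (p * 2) (N + 1) p
  · rw [if_pos ⟨hm, hj⟩]
    have := hdvd_iff.mp hm
    have hex : ∃ q, q < (p+1).toNat ∧ primeB q = true ∧ q ∣ j ∧ 2 * q ≤ j :=
      ⟨p.toNat, by omega, hpr, this.1, this.2⟩
    rw [decide_eq_true hex]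
    rfl
  · rw [if_neg (by tauto), hget j hj]
    have hiff : (∃ q, q < (p + 1).toNat ∧ primeB q = true ∧ q ∣ j ∧ 2 * q ≤ j) ↔
        (∃ q, q < p.toNat ∧ primeB q = true ∧ q ∣ j ∧ 2 * q ≤ j) := by
      constructor
      · rintro ⟨q, hq, hprq, hdq, h2q⟩
        refine ⟨q, ?_, hprq, hdq, h2q⟩
        rcases Nat.lt_or_ge q p.toNat with h' | h'
        · exact h'
        · exfalso
          have : q = p.toNat := by omega
          subst this
          exact hm (hdvd_iff.mpr ⟨hdq, h2q⟩)
      · rintro ⟨q, hq, hrest⟩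
        exact ⟨q, by omega, hrest⟩
    rw [decide_eq_decide.mpr hiff]


theorem SInv_query {N p : Int} {arr : List Bool} (h : SInv N p arr)
    (hp : 2 ≤ p) (hpN : p ≤ N) :
    PySem.List.pyGet? arr p = some (primeB p.toNat) := by
  obtain ⟨hlen, hget⟩ := h
  have hplen : p.toNat < arr.length := by omega
  rw [PySem.List.pyGet?_of_nonneg arr (by omega), hget _ hplen]
  congr 1
  have hiff : (∃ q, q < p.toNat ∧ primeB q = true ∧ q ∣ p.toNat ∧ 2 * q ≤ p.toNat) ↔
      ¬ Nat.Prime p.toNat := by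
    constructor
    · rintro ⟨q, hq, hprq, hdq, h2q⟩ hprime
      have := (Nat.prime_def_lt.mp hprime).2 q hq hdq
      have := ((primeB_iff q).mp hprq).two_le
      omega
    · intro hnp
      set q := p.toNat.minFac with hqdef
      have hq2 : 2 ≤ p.toNat := by omega
      have hqp : Nat.Prime q := Nat.minFac_prime (by omega)
      have hqd : q ∣ p.toNat := Nat.minFac_dvd _
      have hqs : q ^ 2 ≤ p.toNat := Nat.minFac_sq_le_self (by omega) hnp
      have hq2' : 2 ≤ q := hqp.two_le
      refine ⟨q, ?_, (primeB_iff q).mpr hqp, hqd, by nlinarith⟩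
      nlinarith
  have hd : decide (∃ q, q < p.toNat ∧ primeB q = true ∧ q ∣ p.toNat ∧ 2 * q ≤ p.toNat)
      = ! primeB p.toNat := by
    rcases hb : primeB p.toNat with _ | _
    · simp only [Bool.not_false]
      exact decide_eq_true (hiff.mpr (fun hc => by rw [(primeB_iff _).mpr hc] at hb; cases hb))
    · simp only [Bool.not_true]
      exact decide_eq_false (fun hc => (hiff.mp hc) ((primeB_iff _).mp hb))
  rw [hd, Bool.not_not]


-- A's loop returns res unchanged once every remaining prime would overflow the product.
theorem pvLoopA_const (N prod res : Int) :
    ∀ fuel (p : Int) arr, 2 ≤ p → 1 ≤ prod → SInv N p arr →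
      (∀ q : Int, p ≤ q → q * q ≤ N → primeB q.toNat = true → N < prod * q) →
      pvLoopA N fuel arr prod res p = res := by
  intro fuel
  induction fuel with
  | zero => intro p arr _ _ _ _; rfl
  | succ fuel ih =>
    intro p arr hp hprod hinv hq
    simp only [pvLoopA]
    by_cases hga : p * p ≤ N
    · rw [if_pos hga]
      have hpN : p ≤ N := by nlinarith
      rw [SInv_query hinv hp hpN]
      rcases hb : primeB p.toNat with _ | _
    -- composite: step on
      · rw [if_neg (show ¬ ((some false == some true) = true) by simp)]
        exact ih (p + 1) arr (by omega) hprod (SInv_step_comp hinv (by omega) hb)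
          (fun q h1 h2 h3 => hq q (by omega) h2 h3)
    -- prime: product overflows, early return
      · have : N < prod * p := hq p le_rfl hga hb
        rw [if_pos (show ((some true == some true) = true) from rfl)]
        rw [if_pos (by omega : prod * p > N)]
    · rw [if_neg hga]


-- B's loop returns count unchanged if no remaining candidate is a prime that fits.


-- B's loop returns count unchanged if no remaining candidate is a prime that fits.
theorem pvLoopB_const (N prod count : Int) :
    ∀ fuel (p : Int), (∀ q : Int, p ≤ q → prod * q ≤ N → pvIsPrime q = false) →
      pvLoopB N fuel prod count p = count := by
  intro fuel
  induction fuel with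
  | zero => intro p _; rfl
  | succ fuel ih =>
    intro p hq
    simp only [pvLoopB]
    by_cases hgb : prod * p ≤ N
    · rw [if_pos hgb, hq p le_rfl hgb, if_neg (by simp)]
      exact ih (p + 1) (fun q h1 h2 => hq q (by omega) h2)
    · rw [if_neg hgb]


-- Lockstep: for N ≥ 16 the two loops advance through identical states.


-- Lockstep: for N ≥ 16 the two loops advance through identical states.
theorem lockstep (N : Int) (hN16 : 16 ≤ N) (hNB : N ≤ 2147483648) :
    ∀ fa : Nat, ∀ (fb : Nat) (p prod res : Int) (arr : List Bool),
      2 ≤ p → prod = (P p.toNat : Int) → prod ≤ N → SInv N p arr →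
      (N + 1 - p).toNat < fa → (N + 1 - p).toNat < fb →
      pvLoopA N fa arr prod res p = pvLoopB N fb prod res p := by
  intro fa
  induction fa with
  | zero => intro fb p prod res arr _ _ _ _ hfa _; omega
  | succ fa ih =>
    intro fb p prod res arr hp hP hprodN hinv hfa hfb
    rcases fb with _ | fb
    · omega
    have hprod1 : 1 ≤ prod := by
      rw [hP]; exact_mod_cast P_pos p.toNat
    have hcast : (p + 1).toNat = p.toNat + 1 := by omega
    simp only [pvLoopA, pvLoopB]
    have hBtest : pvIsPrime p = primeB p.toNat := pvIsPrime_eq p (by omega)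
    by_cases hga : p * p ≤ N
    · have hpN : p ≤ N := by nlinarith
      rw [if_pos hga, SInv_query hinv hp hpN]
      by_cases hgb : prod * p ≤ N
      · rw [if_pos hgb]
        rcases hb : primeB p.toNat with _ | _
        · -- composite
          rw [hBtest, hb]
          rw [if_neg (show ¬ ((some false == some true) = true) by simp)]
          rw [if_neg (show ¬ (false = true) by simp)]
          exact ih fb (p + 1) prod res arr (by omega) (by rw [hP, hcast]; simp [P, hb])
            hprodN (SInv_step_comp hinv (by omega) hb) (by omega) (by omega)
        · -- prime
          rw [hBtest, hb]
          rw [if_pos (show ((some true == some true) = true) from rfl)]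
          rw [if_pos (show (true = true) from rfl), if_neg (by omega : ¬ prod * p > N)]
          refine ih fb (p + 1) (prod * p) (res + 1)
            (pvMark arr (PySem.List.pyRange (p * 2) (N + 1) p)) (by omega)
            ?_ hgb (SInv_step_prime hinv hp hpN hb) (by omega) (by omega)
          rw [hP, hcast]
          simp only [P, hb, if_pos]
          push_cast
          rw [show ((p.toNat : Nat) : Int) = p from by omega]
          ring
      · -- B exits now; A returns res (now or later)
        rw [if_neg hgb]
        rcases hb : primeB p.toNat with _ | _
        · rw [if_neg (show ¬ ((some false == some true) = true) by simp)]
          exact pvLoopA_const N prod res fa (p + 1) arr (by omega) hprod1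
            (SInv_step_comp hinv (by omega) hb)
            (fun q h1 h2 h3 => by nlinarith)
        · rw [if_pos (show ((some true == some true) = true) from rfl)]
          rw [if_pos (by omega : prod * p > N)]
    · -- A exits now
      rw [if_neg hga]
      by_cases hgb : prod * p ≤ N
      · rw [if_pos hgb]
        -- every remaining candidate prime would overflow: prod ≥ p
        have hp5 : 5 ≤ p := by nlinarith
        have hple : p.toNat ≤ 32 := by
          by_contra hgt
          have h33 : P 33 ≤ P p.toNat := P_mono (by omega)
          have : (2147483648 : Int) < (P p.toNat : Int) := by
            have := P_33
            exact_mod_cast lt_of_lt_of_le P_33 h33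
          omega
        have hpP : p ≤ prod := by
          have := P_ge_self p.toNat (by omega) (by omega)
          omega
        rcases hb : primeB p.toNat with _ | _
        · rw [hBtest, hb, if_neg (show ¬ (false = true) by simp)]
          refine (pvLoopB_const N prod res fb (p + 1) ?_).symm
          intro q h1 h2
          rw [pvIsPrime_eq q (by omega)]
          rcases hbq : primeB q.toNat with _ | _
          · rfl
          · exfalso; nlinarith
        · exfalso
          nlinarith
      · rw [if_neg hgb]


theorem alt_small (N : Int) (h : N < 2) : maxPrimefactorNum_alt N = 0 := by
  unfold maxPrimefactorNum_alt
  rcases hf : (N + 1).toNat with _ | n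
  · rfl
  · simp only [pvLoopB]
    rw [if_neg (by omega : ¬ (1 * 2 ≤ N))]


-- ===== VERDICT (by name: the statement is the Claim_ definition above) =====
theorem maxPrimefactorNum_spec : Claim_unchanged_maxPrimefactorNum := by
  intro N hdom
  unfold Spec_maxPrimefactorNum
  intro hnd
  have hNB : N ≤ 2147483648 := by
    unfold Dom_maxPrimefactorNum pvDomInt at hdom
    simp only [decide_eq_true_eq] at hdom
    omega
  by_cases h2 : N < 2
  · rw [alt_small N h2]
    unfold maxPrimefactorNum
    rw [if_pos h2]
  · push_neg at h2
    by_cases h16 : N < 16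
    · interval_cases N <;> first
        | exact absurd (by decide) hnd
        | decide
    · push_neg at h16
      unfold maxPrimefactorNum maxPrimefactorNum_alt
      rw [if_neg (by omega)]
      exact lockstep N h16 hNB (N + 1).toNat (N + 1).toNat 2 1 0
        (List.replicate (N + 1).toNat true) (by omega) (by decide) (by omega)
        (SInv_init N (by omega)) (by omega) (by omega)


theorem maxPrimefactorNum_changed : Claim_changed_maxPrimefactorNum := by
  unfold Claim_changed_maxPrimefactorNum; decide

theorem maxPrimefactorNum_tight : Claim_exact_maxPrimefactorNum := by
  intro N _ hd
  rcases hd with rfl | rfl | ⟨h1, h2⟩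
  · decide
  · decide
  · interval_cases N <;> decide
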